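-- pv_equiv track=rewrite | github.com/joseporras00/3-MH | P3/josepov2.py | sacarRestricciones
-- ===== SOURCE A (Python) =====
-- def sacarRestricciones(registro):
--
--     nodos=registro[::2]
--     valores=registro[1::2]
--
--     grafo=[]
--
--     fila=[0]
--     for i in range(len(nodos)):
--         fila.append(nodos[i])
--     grafo.append(fila)
--
--     for i in range(len(nodos)):
--         fila2=[]
--         fila2.append(nodos[i])
--         for j in range(len(nodos)):
--             if(i != j):
--                 fila2.append(int(valores[j])-int(valores[i]))
--             else:
--                 fila2.append(0)
--         grafo.append(fila2)
--
--     return grafo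
-- ===== SOURCE B (Python) =====
-- def sacarRestricciones(registro):
--     nodos = registro[::2]
--     vals = registro[1::2]
--     n = len(nodos)
--     grafo = [[0] + nodos] + [[x] + [0] * n for x in nodos]
--     for i in range(n):
--         for j in range(i + 1, n):
--             d = int(vals[j]) - int(vals[i])
--             grafo[i + 1][j + 1] = d
--             grafo[j + 1][i + 1] = -d
--     return grafo
-- ===== Notes on version B (the rewrite author's own statement) =====
-- stated objective: alternative
-- what changed: B pre-allocates the header plus zero-filled rows and then fills only the pairs i<j, computing each difference once and writing d and -d by antisymmetry, instead of A's append-driven full n x n double loop that recomputes every difference.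
import Mathlib
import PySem

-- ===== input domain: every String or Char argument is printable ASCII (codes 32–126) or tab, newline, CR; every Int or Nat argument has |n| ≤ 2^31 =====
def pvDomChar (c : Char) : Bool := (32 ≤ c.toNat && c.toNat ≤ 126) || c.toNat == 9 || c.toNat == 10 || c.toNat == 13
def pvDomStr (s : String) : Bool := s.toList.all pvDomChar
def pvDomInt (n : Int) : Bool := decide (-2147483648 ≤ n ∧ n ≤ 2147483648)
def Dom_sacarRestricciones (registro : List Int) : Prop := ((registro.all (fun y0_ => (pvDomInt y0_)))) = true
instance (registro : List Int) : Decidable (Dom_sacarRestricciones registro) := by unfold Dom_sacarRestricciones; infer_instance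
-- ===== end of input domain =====

-- B replaces A's full n×n difference double loop by a zero-prefilled matrix updated
-- only on pairs i<j, writing d and -d by antisymmetry (objective: alternative decomposition).

-- ===== PORT A =====
def sacarRestricciones (registro : List Int) : List (List Int) :=
  let nodos := (PySem.List.slice? registro none none 2).getD []
  let valores := (PySem.List.slice? registro (some 1) none 2).getD []
  let fila := (PySem.List.pyRange 0 (nodos.length : Int) 1).foldl
      (fun f i => f ++ [PySem.List.pyGetD nodos i 0]) [0]
  let grafo := [fila]
  (PySem.List.pyRange 0 (nodos.length : Int) 1).foldl (fun g i =>
    let fila2 := (PySem.List.pyRange 0 (nodos.length : Int) 1).foldl (fun f j =>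
      if i ≠ j then f ++ [PySem.List.pyGetD valores j 0 - PySem.List.pyGetD valores i 0]
      else f ++ [0]) [PySem.List.pyGetD nodos i 0]
    g ++ [fila2]) grafo

-- ===== PORT B =====
def sacarRestricciones_alt (registro : List Int) : List (List Int) :=
  let nodos := (PySem.List.slice? registro none none 2).getD []
  let vals := (PySem.List.slice? registro (some 1) none 2).getD []
  let n := nodos.length
  let grafo := (0 :: nodos) :: nodos.map (fun x => x :: List.replicate n 0)
  (PySem.List.pyRange 0 (n : Int) 1).foldl (fun g i =>
    (PySem.List.pyRange (i+1) (n : Int) 1).foldl (fun g j =>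
      let d := PySem.List.pyGetD vals j 0 - PySem.List.pyGetD vals i 0
      let g1 := PySem.List.pySetD g (i+1) (PySem.List.pySetD (PySem.List.pyGetD g (i+1) []) (j+1) d)
      PySem.List.pySetD g1 (j+1) (PySem.List.pySetD (PySem.List.pyGetD g1 (j+1) []) (i+1) (-d))) g) grafo

-- ===== PRECONDITION & SPEC =====
-- Pre_ excludes exactly the odd-length inputs of length ≥ 3, on which Python A raises
-- IndexError (valores = registro[1::2] is one element shorter than nodos = registro[::2]).
def Pre_sacarRestricciones (registro : List Int) : Prop :=
  registro.length % 2 = 0 ∨ registro.length = 1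
instance (registro : List Int) : Decidable (Pre_sacarRestricciones registro) := by
  unfold Pre_sacarRestricciones; infer_instance
def pvWitness_sacarRestricciones : List Int := [1, 5, 2, 7]

def Spec_sacarRestricciones (registro : List Int) (out : List (List Int)) : Prop := out = sacarRestricciones_alt registro
instance (registro : List Int) (out : List (List Int)) : Decidable (Spec_sacarRestricciones registro out) := by unfold Spec_sacarRestricciones; infer_instance

-- ===== CLAIM (what is proved, stated in full; the proofs are below) =====
def Claim_equal_sacarRestricciones : Prop := ∀ (registro : List Int), Dom_sacarRestricciones registro → Pre_sacarRestricciones registro → Spec_sacarRestricciones registro (sacarRestricciones registro)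

-- ===== LEMMAS AND PROOFS =====

-- the common normal form: header row, then row i = nodos[i] :: entries, where the (i,j)
-- entry is vals[j] - vals[i] when the fill predicate p holds and 0 otherwise
def pvFill (nodos vals : List Int) (p : Nat → Nat → Bool) : List (List Int) :=
  (0 :: nodos) :: (List.range nodos.length).map (fun (i : Nat) =>
    PySem.List.pyGetD nodos (i : Int) 0 :: (List.range nodos.length).map (fun (j : Nat) =>
      if p i j then PySem.List.pyGetD vals (j : Int) 0 - PySem.List.pyGetD vals (i : Int) 0 else 0))

lemma pvSet_map_range {α : Type} (n i : Nat) (f : Nat → α) (y : α) :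
    ((List.range n).map f).set i y =
      (List.range n).map (fun a => if a = i then y else f a) := by
  apply List.ext_getElem
  · simp
  · intro k h1 h2
    simp only [List.length_set, List.length_map, List.length_range] at h1
    by_cases h3 : i = k
    · subst h3; simp
    · have h4 : k ≠ i := fun h => h3 h.symm
      simp [h3, h4]

lemma pvFill_congr (nodos vals : List Int) (p q : Nat → Nat → Bool)
    (h : ∀ a b, a < nodos.length → b < nodos.length → p a b = q a b) :
    pvFill nodos vals p = pvFill nodos vals q := by
  unfold pvFill
  congr 1
  apply List.map_congr_left
  intro a ha
  simp only [List.mem_range] at ha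
  congr 1
  apply List.map_congr_left
  intro b hb
  simp only [List.mem_range] at hb
  rw [h a b ha hb]

lemma pvFoldl_append_ite {α β : Type} (p : α → Prop) [DecidablePred p] (f g : α → β)
    (l : List α) (acc : List β) :
    l.foldl (fun acc x => if p x then acc ++ [f x] else acc ++ [g x]) acc =
      acc ++ l.map (fun x => if p x then f x else g x) := by
  have h : (fun (acc : List β) x => if p x then acc ++ [f x] else acc ++ [g x]) =
      fun acc x => acc ++ [if p x then f x else g x] := by
    funext acc x; split_ifs <;> rfl
  rw [h, PySem.List.foldl_append_singleton_eq_map]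

lemma pvA_eq (nodos valores : List Int) :
    ((PySem.List.pyRange 0 (nodos.length : Int) 1).foldl (fun g i =>
      let fila2 := (PySem.List.pyRange 0 (nodos.length : Int) 1).foldl (fun f j =>
        if i ≠ j then f ++ [PySem.List.pyGetD valores j 0 - PySem.List.pyGetD valores i 0]
        else f ++ [0]) [PySem.List.pyGetD nodos i 0]
      g ++ [fila2])
      [(PySem.List.pyRange 0 (nodos.length : Int) 1).foldl
        (fun f i => f ++ [PySem.List.pyGetD nodos i 0]) [0]]) =
    pvFill nodos valores (fun a b => !(a == b)) := by
  simp only [pvFoldl_append_ite, PySem.List.foldl_append_singleton_eq_map,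
    PySem.List.map_pyGetD_pyRange_zero', List.singleton_append]
  unfold pvFill
  rw [PySem.List.pyRange_zero_natCast, List.map_map]
  congr 1
  apply List.map_congr_left
  intro a _
  simp only [Function.comp_apply, List.map_map]
  simp [Nat.cast_inj]

lemma pvStep (nodos vals : List Int) (p : Nat → Nat → Bool) (i j : Nat)
    (hi : i < nodos.length) (hj : j < nodos.length) (hij : i ≠ j) :
    PySem.List.pySetD (PySem.List.pySetD (pvFill nodos vals p) (((i : Nat) : Int)+1) (PySem.List.pySetD (PySem.List.pyGetD (pvFill nodos vals p) (((i : Nat) : Int)+1) []) (((j : Nat) : Int)+1) (PySem.List.pyGetD vals ((j : Nat) : Int) 0 - PySem.List.pyGetD vals ((i : Nat) : Int) 0))) (((j : Nat) : Int)+1) (PySem.List.pySetD (PySem.List.pyGetD (PySem.List.pySetD (pvFill nodos vals p) (((i : Nat) : Int)+1) (PySem.List.pySetD (PySem.List.pyGetD (pvFill nodos vals p) (((i : Nat) : Int)+1) []) (((j : Nat) : Int)+1) (PySem.List.pyGetD vals ((j : Nat) : Int) 0 - PySem.List.pyGetD vals ((i : Nat) : Int) 0))) (((j : Nat) : Int)+1)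 []) (((i : Nat) : Int)+1) (-(PySem.List.pyGetD vals ((j : Nat) : Int) 0 - PySem.List.pyGetD vals ((i : Nat) : Int) 0))) =
    pvFill nodos vals (fun a b => p a b || (a == i && b == j) || (a == j && b == i)) := by
  have hi1 : ((i : Int) + 1) = ((i + 1 : Nat) : Int) := by push_cast; ring
  have hj1 : ((j : Int) + 1) = ((j + 1 : Nat) : Int) := by push_cast; ring
  unfold pvFill
  rw [hi1, hj1]
  simp only [PySem.List.pyGetD_natCast, PySem.List.pySetD_natCast, List.getD_eq_getElem?_getD]
  simp only [List.getElem?_cons_succ, List.getElem?_map, List.getElem?_range, hi, hj,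
    Option.map_some, Option.getD_some, List.set_cons_succ, pvSet_map_range]
  congr 1
  apply List.map_congr_left
  intro a ha
  simp only [List.mem_range] at ha
  by_cases haj : a = j
  · subst haj
    rw [if_pos rfl, if_neg (Ne.symm hij), List.set_cons_succ, pvSet_map_range]
    congr 1
    apply List.map_congr_left
    intro b hb
    by_cases hbi : b = i
    · subst hbi
      simp [neg_sub]
    · simp [hbi, Ne.symm hij]
  · rw [if_neg haj]
    by_cases hai : a = i
    · subst hai
      rw [if_pos rfl]
      congr 1
      apply List.map_congr_left
      intro b hb
      by_cases hbj : b = j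
      · subst hbj; simp
      · simp [hbj, haj]
    · rw [if_neg hai]
      congr 1
      apply List.map_congr_left
      intro b hb
      simp [hai, haj]

lemma pvInner (nodos vals : List Int) (i : Nat) (hi : i < nodos.length) :
    ∀ (m : Nat), i < m →
    ∀ (p : Nat → Nat → Bool),
    (PySem.List.pyRange ((m : Nat) : Int) ((nodos.length : Nat) : Int) 1).foldl (fun g j =>
      PySem.List.pySetD (PySem.List.pySetD g (((i : Nat) : Int)+1) (PySem.List.pySetD (PySem.List.pyGetD g (((i : Nat) : Int)+1) []) (j+1) (PySem.List.pyGetD vals j 0 - PySem.List.pyGetD vals ((i : Nat) : Int) 0))) (j+1) (PySem.List.pySetD (PySem.List.pyGetD (PySem.List.pySetD g (((i : Nat) : Int)+1) (PySem.List.pySetD (PySem.List.pyGetD g (((i : Nat) : Int)+1) []) (j+1) (PySem.List.pyGetD vals j 0 - PySem.List.pyGetD vals ((i : Nat) : Int) 0))) (j+1) []) (((i : Nat) : Int)+1) (-(PySem.List.pyGetD vals j 0 - PySem.List.pyGetD vals ((i : Nat) : Int) 0))))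
      (pvFill nodos vals p) =
    pvFill nodos vals (fun a b =>
      p a b || (a == i && decide (m ≤ b) && decide (b < nodos.length))
            || (b == i && decide (m ≤ a) && decide (a < nodos.length))) := by
  have main : ∀ (k m : Nat), nodos.length - m = k → i < m → ∀ (p : Nat → Nat → Bool), (PySem.List.pyRange ((m : Nat) : Int) ((nodos.length : Nat) : Int) 1).foldl (fun g j =>
      PySem.List.pySetD (PySem.List.pySetD g (((i : Nat) : Int)+1) (PySem.List.pySetD (PySem.List.pyGetD g (((i : Nat) : Int)+1) []) (j+1) (PySem.List.pyGetD vals j 0 - PySem.List.pyGetD vals ((i : Nat) : Int) 0))) (j+1) (PySem.List.pySetD (PySem.List.pyGetD (PySem.List.pySetD g (((i : Nat) : Int)+1) (PySem.List.pySetD (PySem.List.pyGetD g (((i : Nat) : Int)+1) []) (j+1) (PySem.List.pyGetD vals j 0 - PySem.List.pyGetD vals ((i : Nat) : Int) 0))) (j+1) []) (((i : Nat) : Int)+1) (-(PySem.List.pyGetD vals j 0 - PySem.List.pyGetD vals ((i : Nat) : Int) 0))))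
      (pvFill nodos vals p) =
    pvFill nodos vals (fun a b =>
      p a b || (a == i && decide (m ≤ b) && decide (b < nodos.length))
            || (b == i && decide (m ≤ a) && decide (a < nodos.length))) := by
    intro k
    induction k with
    | zero =>
      intro m hk him p
      have hnm : (nodos.length : Int) ≤ (m : Int) := by exact_mod_cast (by omega : nodos.length ≤ m)
      rw [PySem.List.pyRange_one_eq_nil hnm, List.foldl_nil]
      apply pvFill_congr
      intro a b ha hb
      have h1 : ¬ m ≤ a := by omega
      have h2 : ¬ m ≤ b := by omega
      simp [h1, h2]
    | succ k ih =>
      intro m hk him p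
      have hmn : m < nodos.length := by omega
      have hmn' : (m : Int) < (nodos.length : Int) := by exact_mod_cast hmn
      rw [PySem.List.pyRange_one_cons hmn', List.foldl_cons]
      rw [pvStep nodos vals p i m hi hmn (by omega)]
      have H := ih (m + 1) (by omega) (by omega)
        (fun a b => p a b || (a == i && b == m) || (a == m && b == i))
      rw [show (((m + 1 : Nat)) : Int) = (m : Int) + 1 by push_cast; ring] at H
      rw [H]
      apply pvFill_congr
      intro a b ha hb
      apply Bool.eq_iff_iff.mpr
      simp only [Bool.or_eq_true, Bool.and_eq_true, beq_iff_eq, decide_eq_true_eq]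
      by_cases hp : p a b = true
      · simp [hp]
      · simp only [hp, Bool.false_eq_true, false_or]
        omega
  intro m him p
  exact main (nodos.length - m) m rfl him p

lemma pvOuter (nodos vals : List Int) :
    ∀ (k : Nat) (p : Nat → Nat → Bool),
    (PySem.List.pyRange ((k : Nat) : Int) ((nodos.length : Nat) : Int) 1).foldl (fun g i =>
      (PySem.List.pyRange (i+1) ((nodos.length : Nat) : Int) 1).foldl (fun g j =>
        PySem.List.pySetD (PySem.List.pySetD g (i+1) (PySem.List.pySetD (PySem.List.pyGetD g (i+1) []) (j+1) (PySem.List.pyGetD vals j 0 - PySem.List.pyGetD vals i 0))) (j+1) (PySem.List.pySetD (PySem.List.pyGetD (PySem.List.pySetD g (i+1) (PySem.List.pySetD (PySem.List.pyGetD g (i+1) []) (j+1) (PySem.List.pyGetD vals j 0 - PySem.List.pyGetD vals i 0))) (j+1) []) (i+1) (-(PySem.List.pyGetD vals j 0 - PySem.List.pyGetD vals i 0)))) g)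
      (pvFill nodos vals p) =
    pvFill nodos vals (fun a b =>
      p a b || (!(a == b) && decide (k ≤ a) && decide (k ≤ b)
                && decide (a < nodos.length) && decide (b < nodos.length))) := by
  have main : ∀ (c k : Nat), nodos.length - k = c → ∀ (p : Nat → Nat → Bool), (PySem.List.pyRange ((k : Nat) : Int) ((nodos.length : Nat) : Int) 1).foldl (fun g i =>
      (PySem.List.pyRange (i+1) ((nodos.length : Nat) : Int) 1).foldl (fun g j =>
        PySem.List.pySetD (PySem.List.pySetD g (i+1) (PySem.List.pySetD (PySem.List.pyGetD g (i+1) []) (j+1) (PySem.List.pyGetD vals j 0 - PySem.List.pyGetD vals i 0))) (j+1) (PySem.List.pySetD (PySem.List.pyGetD (PySem.List.pySetD g (i+1) (PySem.List.pySetD (PySem.List.pyGetD g (i+1) []) (j+1) (PySem.List.pyGetD vals j 0 - PySem.List.pyGetD vals i 0))) (j+1) []) (i+1) (-(PySem.List.pyGetD vals j 0 - PySem.List.pyGetD vals i 0)))) g)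
      (pvFill nodos vals p) =
    pvFill nodos vals (fun a b =>
      p a b || (!(a == b) && decide (k ≤ a) && decide (k ≤ b)
                && decide (a < nodos.length) && decide (b < nodos.length))) := by
    intro c
    induction c with
    | zero =>
      intro k hk p
      have hnk : (nodos.length : Int) ≤ (k : Int) := by exact_mod_cast (by omega : nodos.length ≤ k)
      rw [PySem.List.pyRange_one_eq_nil hnk, List.foldl_nil]
      apply pvFill_congr
      intro a b ha hb
      have h1 : ¬ k ≤ a := by omega
      simp [h1]
    | succ c ih =>
      intro k hk p
      have hkn : k < nodos.length := by omega
      have hkn' : (k : Int) < (nodos.length : Int) := by exact_mod_cast hkn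
      rw [PySem.List.pyRange_one_cons hkn', List.foldl_cons]
      have Hin := pvInner nodos vals k hkn (k + 1) (by omega) p
      rw [show (((k + 1 : Nat)) : Int) = (k : Int) + 1 by push_cast; ring] at Hin
      rw [Hin]
      have H := ih (k + 1) (by omega)
        (fun a b => p a b || (a == k && decide (k + 1 ≤ b) && decide (b < nodos.length))
                  || (b == k && decide (k + 1 ≤ a) && decide (a < nodos.length)))
      rw [show (((k + 1 : Nat)) : Int) = (k : Int) + 1 by push_cast; ring] at H
      rw [H]
      apply pvFill_congr
      intro a b ha hb
      apply Bool.eq_iff_iff.mpr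
      simp only [Bool.or_eq_true, Bool.and_eq_true, beq_iff_eq, decide_eq_true_eq,
        Bool.not_eq_true', beq_eq_false_iff_ne, ne_eq]
      by_cases hp : p a b = true
      · simp [hp]
      · simp only [hp, Bool.false_eq_true, false_or]
        omega
  intro k p
  exact main (nodos.length - k) k rfl p

lemma pvOuter0 (nodos vals : List Int) :
    (PySem.List.pyRange 0 ((nodos.length : Nat) : Int) 1).foldl (fun g i =>
      (PySem.List.pyRange (i+1) ((nodos.length : Nat) : Int) 1).foldl (fun g j =>
        PySem.List.pySetD (PySem.List.pySetD g (i+1) (PySem.List.pySetD (PySem.List.pyGetD g (i+1) []) (j+1) (PySem.List.pyGetD vals j 0 - PySem.List.pyGetD vals i 0))) (j+1) (PySem.List.pySetD (PySem.List.pyGetD (PySem.List.pySetD g (i+1) (PySem.List.pySetD (PySem.List.pyGetD g (i+1) []) (j+1) (PySem.List.pyGetD vals j 0 - PySem.List.pyGetD vals i 0))) (j+1) []) (i+1) (-(PySem.List.pyGetD vals j 0 - PySem.List.pyGetD vals i 0)))) g)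
      (pvFill nodos vals (fun _ _ => false)) =
    pvFill nodos vals (fun a b =>
      (!(a == b) && decide (a < nodos.length) && decide (b < nodos.length))) := by
  have h := pvOuter nodos vals 0 (fun _ _ => false)
  simpa using h

lemma pvB_init (nodos vals : List Int) :
    (0 :: nodos) :: nodos.map (fun x => x :: List.replicate nodos.length 0) =
    pvFill nodos vals (fun _ _ => false) := by
  unfold pvFill
  congr 1
  apply List.ext_getElem
  · simp
  · intro k h1 h2
    simp only [List.length_map] at h1
    simp [PySem.List.pyGetD_natCast, List.getD_eq_getElem?_getD, List.getElem?_eq_getElem h1]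

-- ===== VERDICT (by name: the statement is the Claim_ definition above) =====
theorem sacarRestricciones_spec : Claim_equal_sacarRestricciones := by
  intro registro _ _
  unfold Spec_sacarRestricciones
  simp only [sacarRestricciones, sacarRestricciones_alt]
  rw [pvA_eq, pvB_init _ ((PySem.List.slice? registro (some 1) none 2).getD []), pvOuter0]
  apply pvFill_congr
  intro a b ha hb
  simp [ha, hb]
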